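-- pv_equiv track=rewrite | github.com/Preranabarat/Python | module_programme/vowel_consonent.py | count_vowels_consonants_blanks
-- ===== SOURCE A (Python) =====
-- def count_vowels_consonants_blanks(string):
--     vowels = 0
--     consonants = 0
--     blanks = 0
--
--     # Converting string to lowercase to simplify comparison
--     string = string.lower()
--
--     for char in string:
--         if char in 'aeiouAEIOU':
--             vowels += 1
--         elif char.isalpha():
--             consonants += 1
--         elif char == ' ':
--             blanks += 1
--
--     return vowels, consonants, blanks
-- ===== SOURCE B (Python) =====
-- def count_vowels_consonants_blanks(string):
--     # Three staged passes over the lowered string: count vowels, count letters,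
--     # count spaces; consonants are derived by subtraction (every vowel is a letter).
--     s = string.lower()
--     vowels = sum(c in 'aeiouAEIOU' for c in s)
--     letters = sum(c.isalpha() for c in s)
--     blanks = sum(c == ' ' for c in s)
--     return vowels, letters - vowels, blanks
-- ===== Notes on version B (the rewrite author's own statement) =====
-- stated objective: alternative
-- what changed: B replaces A's single fold with an if/elif chain by three independent counting passes (vowels, letters, spaces) and derives the consonant count arithmetically as letters minus vowels.
import Mathlib
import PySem

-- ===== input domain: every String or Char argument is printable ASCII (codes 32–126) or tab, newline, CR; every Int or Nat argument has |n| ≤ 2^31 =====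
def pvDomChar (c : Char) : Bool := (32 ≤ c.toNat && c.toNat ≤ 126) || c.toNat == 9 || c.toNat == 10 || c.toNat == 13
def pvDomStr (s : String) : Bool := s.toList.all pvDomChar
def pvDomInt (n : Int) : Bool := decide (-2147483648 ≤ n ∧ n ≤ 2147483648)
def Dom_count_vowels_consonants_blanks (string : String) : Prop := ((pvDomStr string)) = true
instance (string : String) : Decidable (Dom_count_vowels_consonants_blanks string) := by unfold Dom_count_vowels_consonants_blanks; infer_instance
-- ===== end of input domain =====

-- B replaces A's single fold with an if/elif chain by three independent counting passes
-- (vowels, letters, spaces) and derives consonants as letters minus vowels (alternative).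


-- ===== PORT A =====
-- one position-by-position pass; the elif chain of A, char by char
def count_vowels_consonants_blanks (string : String) : Int × Int × Int :=
  let s := PySem.Str.lower string
  s.toList.foldl (fun (acc : Int × Int × Int) char =>
    if PySem.Chars.isIn [char] "aeiouAEIOU".toList then (acc.1 + 1, acc.2.1, acc.2.2)
    else if PySem.Chars.isalpha char then (acc.1, acc.2.1 + 1, acc.2.2)
    else if char = ' ' then (acc.1, acc.2.1, acc.2.2 + 1)
    else acc) (0, 0, 0)

-- ===== PORT B =====
-- three staged 0/1-sum passes over the lowered string; consonants = letters - vowels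
def count_vowels_consonants_blanks_alt (string : String) : Int × Int × Int :=
  let s := (PySem.Str.lower string).toList
  let vowels : Int := (s.map (fun c => if PySem.Chars.isIn [c] "aeiouAEIOU".toList then (1 : Int) else 0)).sum
  let letters : Int := (s.map (fun c => if PySem.Chars.isalpha c then (1 : Int) else 0)).sum
  let blanks : Int := (s.map (fun c => if c = ' ' then (1 : Int) else 0)).sum
  (vowels, letters - vowels, blanks)

-- ===== PRECONDITION & SPEC =====
def Spec_count_vowels_consonants_blanks (string : String) (out : Int × Int × Int) : Prop := out = count_vowels_consonants_blanks_alt string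
instance (string : String) (out : Int × Int × Int) : Decidable (Spec_count_vowels_consonants_blanks string out) := by unfold Spec_count_vowels_consonants_blanks; infer_instance

-- ===== CLAIM =====
def Claim_equal_count_vowels_consonants_blanks : Prop := ∀ (string : String), Dom_count_vowels_consonants_blanks string → Spec_count_vowels_consonants_blanks string (count_vowels_consonants_blanks string)

-- ===== LEMMAS AND PROOFS =====
-- a single character is 'in' a string iff it is a member of its character list
theorem pvIsInSingleton (c : Char) (l : List Char) : PySem.Chars.isIn [c] l = true ↔ c ∈ l := by
  rw [PySem.Chars.isIn_iff_infix]
  constructor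
  · intro h; exact List.singleton_sublist.mp h.sublist
  · intro h
    obtain ⟨s, t, rfl⟩ := List.append_of_mem h
    exact ⟨s, t, by simp⟩

-- each of A's ten vowel characters is alphabetic
theorem pvVowelAlpha (c : Char) (h : PySem.Chars.isIn [c] "aeiouAEIOU".toList = true) :
    PySem.Chars.isalpha c = true := by
  have hm := (pvIsInSingleton c _).mp h
  have he : "aeiouAEIOU".toList = ['a','e','i','o','u','A','E','I','O','U'] := rfl
  rw [he] at hm
  simp only [List.mem_cons, List.not_mem_nil, or_false] at hm
  rcases hm with rfl|rfl|rfl|rfl|rfl|rfl|rfl|rfl|rfl|rfl <;> decide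

-- splitting a countP along an implied sub-test
theorem pvCountPSplit (p q : Char → Bool) (h : ∀ c, p c = true → q c = true) (l : List Char) :
    l.countP q = l.countP p + l.countP (fun c => !p c && q c) := by
  induction l with
  | nil => simp
  | cons x xs ih =>
    by_cases hp : p x
    · simp [hp, h x hp, ih]; omega
    · by_cases hq : q x <;> simp [hp, hq, ih] <;> omega

-- A's fold, for arbitrary classification tests p (vowel) and q (alpha):
-- it adds one countP per bucket of the elif chain
theorem pvFoldA (p q : Char → Bool) (s : List Char) (a b c : Int) :
    s.foldl (fun (acc : Int × Int × Int) char =>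
      if p char then (acc.1 + 1, acc.2.1, acc.2.2)
      else if q char then (acc.1, acc.2.1 + 1, acc.2.2)
      else if char = ' ' then (acc.1, acc.2.1, acc.2.2 + 1)
      else acc) (a, b, c)
    = (a + s.countP (fun x => p x),
       b + s.countP (fun x => !p x && q x),
       c + s.countP (fun x => !p x && !q x && decide (x = ' '))) := by
  induction s generalizing a b c with
  | nil => simp
  | cons x xs ih =>
    rw [List.foldl_cons]
    by_cases hv : p x
    · simp [hv, ih, Prod.ext_iff]; omega
    · by_cases ha : q x
      · simp [hv, ha, ih, Prod.ext_iff]; omega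
      · by_cases hb : x = ' '
        · subst hb; simp [hv, ha, ih, Prod.ext_iff]; omega
        · simp [hv, ha, hb, ih]

-- a 0/1-sum over the prop-valued space test is the corresponding countP
theorem pvSumSpace (L : List Char) :
    (L.map (fun c => if c = ' ' then (1 : Int) else 0)).sum
      = ((L.countP (fun c => decide (c = ' ')) : Nat) : Int) := by
  induction L with
  | nil => simp
  | cons x xs ih => by_cases h : x = ' ' <;> simp [h, ih] <;> omega

-- ===== VERDICT (by name: the statement is the Claim_ definition above) =====
theorem count_vowels_consonants_blanks_spec : Claim_equal_count_vowels_consonants_blanks := by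
  intro string _
  show count_vowels_consonants_blanks string = count_vowels_consonants_blanks_alt string
  simp only [count_vowels_consonants_blanks, count_vowels_consonants_blanks_alt]
  rw [pvFoldA (fun ch => PySem.Chars.isIn [ch] "aeiouAEIOU".toList) PySem.Chars.isalpha]
  simp only [PySem.List.sum_map_ite_one_zero]
  refine Prod.ext ?_ (Prod.ext ?_ ?_)
  · simp
  · have := pvCountPSplit (fun ch => PySem.Chars.isIn [ch] "aeiouAEIOU".toList)
      PySem.Chars.isalpha pvVowelAlpha (PySem.Str.lower string).toList
    simp only [this]
    push_cast
    ring
  · rw [pvSumSpace]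
    have hc : List.countP
        (fun x => !PySem.Chars.isIn [x] (['a','e','i','o','u','A','E','I','O','U'] : List Char)
                    && !PySem.Chars.isalpha x && decide (x = ' '))
        (PySem.Chars.lower string.toList)
        = List.countP (fun c => decide (c = ' ')) (PySem.Chars.lower string.toList) :=
      List.countP_congr (fun c _ => by
        by_cases h : c = ' '
        · subst h; decide
        · simp [h])
    simp
    exact hc
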